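-- pv_equiv track=rewrite | github.com/MihaelaNichita/Books-to-Images | gui_w_model.py | noLetterandDigit
-- ===== SOURCE A (Python) =====
-- def noLetterandDigit(word):
-- 	digit = False
-- 	letter = False
-- 	for c in word:
-- 		if c in '0123456789':
-- 			digit = True
-- 		else:
-- 			letter = True
-- 		if (digit and letter) == True:
-- 			return False
-- 	return True
-- ===== SOURCE B (Python) =====
-- def noLetterandDigit(word):
--     digits = '0123456789'
--     has_digit = any(c in digits for c in word)
--     has_other = any(c not in digits for c in word)
--     return not (has_digit and has_other)
-- ===== Notes on version B (the rewrite author's own statement) =====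
-- stated objective: simpler
-- what changed: Replaces the fused early-exit loop maintaining two mutable flags with two independent short-circuiting any() scans combined by one boolean formula.
import Mathlib
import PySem

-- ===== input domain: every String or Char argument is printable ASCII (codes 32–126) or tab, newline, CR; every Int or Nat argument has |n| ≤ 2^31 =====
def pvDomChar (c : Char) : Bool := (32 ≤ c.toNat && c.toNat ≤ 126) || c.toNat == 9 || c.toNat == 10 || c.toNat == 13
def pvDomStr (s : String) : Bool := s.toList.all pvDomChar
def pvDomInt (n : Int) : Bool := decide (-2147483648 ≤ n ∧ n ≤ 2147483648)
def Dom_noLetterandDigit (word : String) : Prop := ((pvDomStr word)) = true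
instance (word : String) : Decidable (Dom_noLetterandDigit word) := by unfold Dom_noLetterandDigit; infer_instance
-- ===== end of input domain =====

-- B: two independent short-circuiting any-scans instead of A's fused loop with two mutable flags (simpler decomposition).
-- ===== PORT A =====
def pvIsDig (c : Char) : Bool := ("0123456789".toList).contains c

def noLetterandDigitGo : List Char → Bool → Bool → Bool
  | [], _, _ => true
  | c :: cs, digit, letter =>
    let digit' := if pvIsDig c then true else digit
    let letter' := if pvIsDig c then letter else true
    if digit' && letter' then false else noLetterandDigitGo cs digit' letter'

def noLetterandDigit (word : String) : Bool :=
  noLetterandDigitGo word.toList false false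

-- ===== PORT B =====
def noLetterandDigit_alt (word : String) : Bool :=
  let hasDigit := word.toList.any pvIsDig
  let hasOther := word.toList.any (fun c => !(pvIsDig c))
  !(hasDigit && hasOther)

-- ===== PRECONDITION & SPEC =====
def Spec_noLetterandDigit (word : String) (out : Bool) : Prop := out = noLetterandDigit_alt word
instance (word : String) (out : Bool) : Decidable (Spec_noLetterandDigit word out) := by unfold Spec_noLetterandDigit; infer_instance

-- ===== CLAIM (what is proved, stated in full; the proofs are below) =====
def Claim_equal_noLetterandDigit : Prop := ∀ (word : String), Dom_noLetterandDigit word → Spec_noLetterandDigit word (noLetterandDigit word)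

-- ===== LEMMAS AND PROOFS =====

-- ===== VERDICT (by name: the statement is the Claim_ definition above) =====
lemma go_eq (cs : List Char) : ∀ d l : Bool, (d && l) = false →
    noLetterandDigitGo cs d l =
      !((d || cs.any pvIsDig) && (l || cs.any (fun c => !(pvIsDig c)))) := by
  induction cs with
  | nil => intro d l h; simp [noLetterandDigitGo, h]
  | cons c cs ih =>
    intro d l h
    by_cases hc : pvIsDig c = true <;>
      cases d <;> cases l <;>
        simp_all [noLetterandDigitGo]

theorem noLetterandDigit_spec : Claim_equal_noLetterandDigit := by
  intro word _
  unfold Spec_noLetterandDigit noLetterandDigit noLetterandDigit_alt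
  simpa using go_eq word.toList false false rfl
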